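-- pv_equiv track=rewrite | github.com/manwar/perlweeklychallenge-club | challenge-036/lubos-kolouch/python/ch-2.py | calculate_value
-- ===== SOURCE A (Python) =====
-- weight = {'R':1, 'B':1, 'G':2, 'Y':12, 'P':4}
--
-- value  = {'R':1, 'B':2, 'G':2, 'Y':4, 'P':10}
--
-- weight_limit=15
--
-- def calculate_value(boxes):
--     total_weight = 0
--     total_value = 0
--     for box in boxes:
--         total_weight += weight[box]
--         total_value += value[box]
--
--     if total_weight <= weight_limit:
--         return total_value
--
--     return 0
-- ===== SOURCE B (Python) =====
-- weight = {'R':1, 'B':1, 'G':2, 'Y':12, 'P':4}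
--
-- value  = {'R':1, 'B':2, 'G':2, 'Y':4, 'P':10}
--
-- weight_limit = 15
--
-- def calculate_value(boxes):
--     counts = {b: boxes.count(b) for b in dict.fromkeys(boxes)}
--     total_weight = sum(c * weight[b] for b, c in counts.items())
--     total_value  = sum(c * value[b] for b, c in counts.items())
--     return total_value if total_weight <= weight_limit else 0
-- ===== Notes on version B (the rewrite author's own statement) =====
-- stated objective: alternative
-- what changed: B replaces A's per-element accumulation with a frequency table: it builds {letter: count} over the distinct letters of boxes once, then computes total_weight and total_value as weighted sums count*weight[b] / count*value[b] over that table before the same threshold check.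
import Mathlib
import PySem

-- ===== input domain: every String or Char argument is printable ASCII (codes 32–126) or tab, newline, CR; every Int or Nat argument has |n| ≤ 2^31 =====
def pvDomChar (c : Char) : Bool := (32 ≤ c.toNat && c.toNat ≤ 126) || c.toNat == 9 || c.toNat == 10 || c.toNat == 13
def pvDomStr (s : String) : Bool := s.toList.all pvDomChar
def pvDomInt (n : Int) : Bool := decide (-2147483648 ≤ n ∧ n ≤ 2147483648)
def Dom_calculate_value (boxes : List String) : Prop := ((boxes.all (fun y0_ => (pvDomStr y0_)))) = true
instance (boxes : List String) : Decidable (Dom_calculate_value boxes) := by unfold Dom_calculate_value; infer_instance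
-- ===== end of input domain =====

-- B builds a per-distinct-letter count table once and sums count*weight / count*value over it, instead of A's per-box accumulation loop; same result, different traversal.

-- ===== PORT A =====
def pvWeightDict : PySem.Dict String Int :=
  PySem.Dict.ofList [("R", 1), ("B", 1), ("G", 2), ("Y", 12), ("P", 4)]
def pvValueDict : PySem.Dict String Int :=
  PySem.Dict.ofList [("R", 1), ("B", 2), ("G", 2), ("Y", 4), ("P", 10)]

-- getD _ 0 stands for Python's weight[box] / value[box]; on a key outside the dict Python raises
-- KeyError, which Pre_calculate_value excludes, so the default is never reached inside the claim.
def calculate_value (boxes : List String) : Int :=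
  let p := boxes.foldl
    (fun (acc : Int × Int) box =>
      (acc.1 + pvWeightDict.getD box 0, acc.2 + pvValueDict.getD box 0)) (0, 0)
  if p.1 ≤ 15 then p.2 else 0

-- ===== PORT B =====
-- counts = {b: boxes.count(b) for b in dict.fromkeys(boxes)}; then per-distinct-key weighted sums.
-- getD _ 0 stands for Python's weight[b] / value[b]; on a key outside the dict Python raises
-- KeyError, which Pre_calculate_value excludes, so the default is never reached inside the claim.
def calculate_value_alt (boxes : List String) : Int :=
  let counts : List (String × Int) :=
    (PySem.List.dedup boxes).map (fun b => (b, (boxes.count b : Int)))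
  let total_weight := counts.foldl (fun s p => s + p.2 * pvWeightDict.getD p.1 0) 0
  let total_value := counts.foldl (fun s p => s + p.2 * pvValueDict.getD p.1 0) 0
  if total_weight ≤ 15 then total_value else 0

-- ===== PRECONDITION & SPEC =====
-- Pre_ excludes exactly the inputs with a letter outside the weight/value tables, on which A raises KeyError.
def Pre_calculate_value (boxes : List String) : Prop :=
  ∀ b ∈ boxes, b = "R" ∨ b = "B" ∨ b = "G" ∨ b = "Y" ∨ b = "P"
instance (boxes : List String) : Decidable (Pre_calculate_value boxes) := by
  unfold Pre_calculate_value; infer_instance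
def pvWitness_calculate_value : List String := ["R", "P", "B"]

def Spec_calculate_value (boxes : List String) (out : Int) : Prop := out = calculate_value_alt boxes
instance (boxes : List String) (out : Int) : Decidable (Spec_calculate_value boxes out) := by unfold Spec_calculate_value; infer_instance

-- ===== CLAIM (what is proved, stated in full; the proofs are below) =====
def Claim_equal_calculate_value : Prop := ∀ (boxes : List String), Dom_calculate_value boxes → Pre_calculate_value boxes → Spec_calculate_value boxes (calculate_value boxes)

-- ===== LEMMAS AND PROOFS =====

-- the per-distinct-key weighted sum over dedup equals the plain per-element sum
theorem pvSum_dedup (f : String → Int) (xs : List String) :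
    ((PySem.List.dedup xs).map (fun b => (xs.count b : Int) * f b)).sum = (xs.map f).sum := by
  have hnd : (PySem.List.dedup xs).Nodup := PySem.List.nodup_dedup xs
  rw [← List.sum_toFinset _ hnd]
  have hfs : (PySem.List.dedup xs).toFinset = xs.toFinset := by
    ext a; simp [List.mem_toFinset]
  rw [hfs, Finset.sum_list_map_count]
  simp

-- A's accumulation loop computes the two per-element sums, shifted by the accumulator
theorem pvFold_eq (boxes : List String) :
    ∀ a c : Int,
    boxes.foldl
      (fun (acc : Int × Int) box =>
        (acc.1 + pvWeightDict.getD box 0, acc.2 + pvValueDict.getD box 0)) (a, c)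
      = (a + (boxes.map (fun b => pvWeightDict.getD b 0)).sum,
         c + (boxes.map (fun b => pvValueDict.getD b 0)).sum) := by
  induction boxes with
  | nil => intro a c; simp
  | cons x rest ih =>
    intro a c
    simp only [List.foldl_cons, List.map_cons, List.sum_cons]
    rw [ih]
    simp only [Prod.mk.injEq]
    constructor <;> ring

-- ===== VERDICT (by name: the statement is the Claim_ definition above) =====
theorem calculate_value_spec : Claim_equal_calculate_value := by
  intro boxes _ _
  unfold Spec_calculate_value calculate_value calculate_value_alt
  simp only [pvFold_eq boxes 0 0, PySem.List.foldl_add, List.map_map, Function.comp_def,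
    pvSum_dedup, zero_add]
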